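-- pv_equiv track=rewrite | github.com/haimingyue/extra-word-from-book | backend/app/services/analysis_service.py | _bucket_key_for_rank
-- ===== SOURCE A (Python) =====
-- DISTRIBUTION_BUCKETS = [
--     {"key": "coca_1_1000", "label": "1-1000", "min_rank": 1, "max_rank": 1000},
--     {"key": "coca_1001_2000", "label": "1001-2000", "min_rank": 1001, "max_rank": 2000},
--     {"key": "coca_2001_3000", "label": "2001-3000", "min_rank": 2001, "max_rank": 3000},
--     {"key": "coca_3001_5000", "label": "3001-5000", "min_rank": 3001, "max_rank": 5000},
--     {"key": "coca_5001_8000", "label": "5001-8000", "min_rank": 5001, "max_rank": 8000},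
--     {"key": "coca_8001_12000", "label": "8001-12000", "min_rank": 8001, "max_rank": 12000},
--     {"key": "coca_12001_15000", "label": "12001-15000", "min_rank": 12001, "max_rank": 15000},
--     {"key": "coca_15001_plus", "label": "15001+", "min_rank": 15001, "max_rank": None},
--     {"key": "unknown", "label": "未收录", "min_rank": None, "max_rank": None},
-- ]
--
-- def _bucket_key_for_rank(coca_rank: int | None) -> str:
--     if coca_rank is None:
--         return "unknown"
--
--     for bucket in DISTRIBUTION_BUCKETS:
--         min_rank = bucket["min_rank"]
--         max_rank = bucket["max_rank"]
--         if min_rank is None: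
--             continue
--         if max_rank is None and coca_rank >= min_rank:
--             return str(bucket["key"])
--         if min_rank <= coca_rank <= max_rank:
--             return str(bucket["key"])
--     return "unknown"
-- ===== SOURCE B (Python) =====
-- _BOUNDS = [1, 1001, 2001, 3001, 5001, 8001, 12001, 15001]
-- _KEYS = [
--     "coca_1_1000",
--     "coca_1001_2000",
--     "coca_2001_3000",
--     "coca_3001_5000",
--     "coca_5001_8000",
--     "coca_8001_12000",
--     "coca_12001_15000",
--     "coca_15001_plus",
-- ]
--
--
-- def _bucket_key_for_rank(coca_rank):
--     if coca_rank is None: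
--         return "unknown"
--     # binary search: lo = bisect_right(_BOUNDS, coca_rank)
--     lo, hi = 0, len(_BOUNDS)
--     while lo < hi:
--         mid = (lo + hi) // 2
--         if _BOUNDS[mid] <= coca_rank:
--             lo = mid + 1
--         else:
--             hi = mid
--     if lo == 0:
--         return "unknown"
--     return _KEYS[lo - 1]
-- ===== Notes on version B (the rewrite author's own statement) =====
-- stated objective: alternative
-- what changed: replaced the linear scan over the bucket dicts with their min/max range tests by a hand-written binary search (bisect_right) over a precomputed list of lower boundaries indexing a parallel key table
import Mathlib
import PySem

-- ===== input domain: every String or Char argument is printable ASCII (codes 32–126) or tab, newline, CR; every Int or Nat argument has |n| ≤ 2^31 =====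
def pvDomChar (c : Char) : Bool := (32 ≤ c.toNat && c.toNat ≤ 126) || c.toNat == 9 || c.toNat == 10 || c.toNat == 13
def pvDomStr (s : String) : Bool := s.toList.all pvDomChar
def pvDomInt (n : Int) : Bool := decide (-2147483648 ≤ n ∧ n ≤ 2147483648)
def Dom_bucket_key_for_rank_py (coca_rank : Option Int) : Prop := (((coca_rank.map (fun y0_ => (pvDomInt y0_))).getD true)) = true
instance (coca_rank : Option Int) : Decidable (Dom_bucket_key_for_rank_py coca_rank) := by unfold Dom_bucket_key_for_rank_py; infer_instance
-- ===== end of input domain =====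

-- B replaces A's linear scan of the bucket table by a binary search over precomputed
-- lower boundaries with a parallel key table (alternative algorithm, same result).

-- ===== PORT A =====
-- DISTRIBUTION_BUCKETS, only the fields the function reads: (key, min_rank, max_rank)
def pvBucketsA : List (String × Option Int × Option Int) :=
  [ ("coca_1_1000", some 1, some 1000),
    ("coca_1001_2000", some 1001, some 2000),
    ("coca_2001_3000", some 2001, some 3000),
    ("coca_3001_5000", some 3001, some 5000),
    ("coca_5001_8000", some 5001, some 8000),
    ("coca_8001_12000", some 8001, some 12000),
    ("coca_12001_15000", some 12001, some 15000),
    ("coca_15001_plus", some 15001, none),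
    ("unknown", none, none) ]

-- the for-loop over DISTRIBUTION_BUCKETS, branch for branch
def pvScanA (coca_rank : Int) : List (String × Option Int × Option Int) → String
  | [] => "unknown"
  | (key, min_rank, max_rank) :: rest =>
    match min_rank with
    | none => pvScanA coca_rank rest               -- min_rank is None: continue
    | some mn =>
      match max_rank with
      | none => if coca_rank ≥ mn then key else pvScanA coca_rank rest
          -- Python's second test `min_rank <= coca_rank <= max_rank` with max_rank = None
          -- short-circuits to False here (mn ≤ r already failed), so it is just `continue`
      | some mx =>
        if mn ≤ coca_rank ∧ coca_rank ≤ mx then key else pvScanA coca_rank rest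

def bucket_key_for_rank_py (coca_rank : Option Int) : String :=
  match coca_rank with
  | none => "unknown"
  | some r => pvScanA r pvBucketsA

-- ===== PORT B =====
def pvBounds : List Int := [1, 1001, 2001, 3001, 5001, 8001, 12001, 15001]
def pvKeys : List String :=
  [ "coca_1_1000", "coca_1001_2000", "coca_2001_3000", "coca_3001_5000",
    "coca_5001_8000", "coca_8001_12000", "coca_12001_15000", "coca_15001_plus" ]

-- the while-loop of Source B: bisect_right binary search
def pvBisect (x : Int) (lo hi : Nat) : Nat :=
  if lo < hi then
    let mid := (lo + hi) / 2
    if pvBounds.getD mid 0 ≤ x then pvBisect x (mid + 1) hi else pvBisect x lo mid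
  else lo
termination_by hi - lo
decreasing_by all_goals omega

def bucket_key_for_rank_py_alt (coca_rank : Option Int) : String :=
  match coca_rank with
  | none => "unknown"
  | some r =>
    let lo := pvBisect r 0 pvBounds.length
    if lo = 0 then "unknown" else pvKeys.getD (lo - 1) ""

-- ===== PRECONDITION & SPEC =====
def Spec_bucket_key_for_rank_py (coca_rank : Option Int) (out : String) : Prop := out = bucket_key_for_rank_py_alt coca_rank
instance (coca_rank : Option Int) (out : String) : Decidable (Spec_bucket_key_for_rank_py coca_rank out) := by unfold Spec_bucket_key_for_rank_py; infer_instance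

-- ===== CLAIM (what is proved, stated in full; the proofs are below) =====
def Claim_equal_bucket_key_for_rank_py : Prop := ∀ (coca_rank : Option Int), Dom_bucket_key_for_rank_py coca_rank → Spec_bucket_key_for_rank_py coca_rank (bucket_key_for_rank_py coca_rank)

-- ===== LEMMAS AND PROOFS =====
-- step lemmas (tiny proof terms; used to evaluate both ports interval by interval)
theorem scan_mm (r : Int) (k : String) (mn mx : Int) (rest : List (String × Option Int × Option Int)) :
    pvScanA r ((k, some mn, some mx) :: rest) = if mn ≤ r ∧ r ≤ mx then k else pvScanA r rest := rfl
theorem scan_mn (r : Int) (k : String) (mn : Int) (rest : List (String × Option Int × Option Int)) :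
    pvScanA r ((k, some mn, none) :: rest) = if r ≥ mn then k else pvScanA r rest := rfl
theorem bis_stop (x : Int) (lo hi : Nat) (h : ¬ lo < hi) : pvBisect x lo hi = lo := by
  rw [pvBisect, if_neg h]
theorem bis_step (x : Int) (lo hi : Nat) (h : lo < hi) :
    pvBisect x lo hi =
      if pvBounds.getD ((lo + hi) / 2) 0 ≤ x then pvBisect x ((lo + hi) / 2 + 1) hi
      else pvBisect x lo ((lo + hi) / 2) := by
  rw [pvBisect, if_pos h]
theorem altv (r : Int) (k : Nat) (h : pvBisect r 0 pvBounds.length = k) :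
    bucket_key_for_rank_py_alt (some r) =
      if k = 0 then "unknown" else pvKeys.getD (k - 1) "" := by
  show (if pvBisect r 0 pvBounds.length = 0 then "unknown"
        else pvKeys.getD (pvBisect r 0 pvBounds.length - 1) "") = _
  rw [h]

theorem scan_none (r : Int) (k : String) (mx : Option Int) (rest : List (String × Option Int × Option Int)) :
    pvScanA r ((k, none, mx) :: rest) = pvScanA r rest := rfl
theorem scan_nil (r : Int) : pvScanA r [] = "unknown" := rfl

theorem bis0 (r : Int) (h : r < 1) : pvBisect r 0 8 = 0 := by
  rw [bis_step r 0 8 (by decide), if_neg (by show ¬ (5001:Int) ≤ r; omega),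
      bis_step r 0 4 (by decide), if_neg (by show ¬ (2001:Int) ≤ r; omega),
      bis_step r 0 2 (by decide), if_neg (by show ¬ (1001:Int) ≤ r; omega),
      bis_step r 0 1 (by decide), if_neg (by show ¬ (1:Int) ≤ r; omega),
      bis_stop r 0 0 (by decide)]

theorem bis1 (r : Int) (h1 : (1:Int) ≤ r) (h2 : r < 1001) : pvBisect r 0 8 = 1 := by
  rw [bis_step r 0 8 (by decide), if_neg (by show ¬ (5001:Int) ≤ r; omega),
      bis_step r 0 4 (by decide), if_neg (by show ¬ (2001:Int) ≤ r; omega),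
      bis_step r 0 2 (by decide), if_neg (by show ¬ (1001:Int) ≤ r; omega),
      bis_step r 0 1 (by decide), if_pos (by show (1:Int) ≤ r; omega),
      bis_stop r 1 1 (by decide)]

theorem bis2 (r : Int) (h1 : (1001:Int) ≤ r) (h2 : r < 2001) : pvBisect r 0 8 = 2 := by
  rw [bis_step r 0 8 (by decide), if_neg (by show ¬ (5001:Int) ≤ r; omega),
      bis_step r 0 4 (by decide), if_neg (by show ¬ (2001:Int) ≤ r; omega),
      bis_step r 0 2 (by decide), if_pos (by show (1001:Int) ≤ r; omega),
      bis_stop r 2 2 (by decide)]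

theorem bis3 (r : Int) (h1 : (2001:Int) ≤ r) (h2 : r < 3001) : pvBisect r 0 8 = 3 := by
  rw [bis_step r 0 8 (by decide), if_neg (by show ¬ (5001:Int) ≤ r; omega),
      bis_step r 0 4 (by decide), if_pos (by show (2001:Int) ≤ r; omega),
      bis_step r 3 4 (by decide), if_neg (by show ¬ (3001:Int) ≤ r; omega),
      bis_stop r 3 3 (by decide)]

theorem bis4 (r : Int) (h1 : (3001:Int) ≤ r) (h2 : r < 5001) : pvBisect r 0 8 = 4 := by
  rw [bis_step r 0 8 (by decide), if_neg (by show ¬ (5001:Int) ≤ r; omega),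
      bis_step r 0 4 (by decide), if_pos (by show (2001:Int) ≤ r; omega),
      bis_step r 3 4 (by decide), if_pos (by show (3001:Int) ≤ r; omega),
      bis_stop r 4 4 (by decide)]

theorem bis5 (r : Int) (h1 : (5001:Int) ≤ r) (h2 : r < 8001) : pvBisect r 0 8 = 5 := by
  rw [bis_step r 0 8 (by decide), if_pos (by show (5001:Int) ≤ r; omega),
      bis_step r 5 8 (by decide), if_neg (by show ¬ (12001:Int) ≤ r; omega),
      bis_step r 5 6 (by decide), if_neg (by show ¬ (8001:Int) ≤ r; omega),
      bis_stop r 5 5 (by decide)]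

theorem bis6 (r : Int) (h1 : (8001:Int) ≤ r) (h2 : r < 12001) : pvBisect r 0 8 = 6 := by
  rw [bis_step r 0 8 (by decide), if_pos (by show (5001:Int) ≤ r; omega),
      bis_step r 5 8 (by decide), if_neg (by show ¬ (12001:Int) ≤ r; omega),
      bis_step r 5 6 (by decide), if_pos (by show (8001:Int) ≤ r; omega),
      bis_stop r 6 6 (by decide)]

theorem bis7 (r : Int) (h1 : (12001:Int) ≤ r) (h2 : r < 15001) : pvBisect r 0 8 = 7 := by
  rw [bis_step r 0 8 (by decide), if_pos (by show (5001:Int) ≤ r; omega),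
      bis_step r 5 8 (by decide), if_pos (by show (12001:Int) ≤ r; omega),
      bis_step r 7 8 (by decide), if_neg (by show ¬ (15001:Int) ≤ r; omega),
      bis_stop r 7 7 (by decide)]

theorem bis8 (r : Int) (h1 : 15001 ≤ r) : pvBisect r 0 8 = 8 := by
  rw [bis_step r 0 8 (by decide), if_pos (by show (5001:Int) ≤ r; omega),
      bis_step r 5 8 (by decide), if_pos (by show (12001:Int) ≤ r; omega),
      bis_step r 7 8 (by decide), if_pos (by show (15001:Int) ≤ r; omega),
      bis_stop r 8 8 (by decide)]

theorem aval0 (r : Int) (h : r < 1) : pvScanA r pvBucketsA = "unknown" := by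
  unfold pvBucketsA
  rw [scan_mm, if_neg (by show ¬ ((1:Int) ≤ r ∧ r ≤ 1000); omega),
      scan_mm, if_neg (by show ¬ ((1001:Int) ≤ r ∧ r ≤ 2000); omega),
      scan_mm, if_neg (by show ¬ ((2001:Int) ≤ r ∧ r ≤ 3000); omega),
      scan_mm, if_neg (by show ¬ ((3001:Int) ≤ r ∧ r ≤ 5000); omega),
      scan_mm, if_neg (by show ¬ ((5001:Int) ≤ r ∧ r ≤ 8000); omega),
      scan_mm, if_neg (by show ¬ ((8001:Int) ≤ r ∧ r ≤ 12000); omega),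
      scan_mm, if_neg (by show ¬ ((12001:Int) ≤ r ∧ r ≤ 15000); omega),
      scan_mn, if_neg (by show ¬ r ≥ (15001:Int); omega),
      scan_none, scan_nil]

theorem aval1 (r : Int) (h1 : (1:Int) ≤ r) (h2 : r < 1001) : pvScanA r pvBucketsA = "coca_1_1000" := by
  unfold pvBucketsA
  rw [scan_mm, if_pos (by show (1:Int) ≤ r ∧ r ≤ 1000; omega)]

theorem aval2 (r : Int) (h1 : (1001:Int) ≤ r) (h2 : r < 2001) : pvScanA r pvBucketsA = "coca_1001_2000" := by
  unfold pvBucketsA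
  rw [scan_mm, if_neg (by show ¬ ((1:Int) ≤ r ∧ r ≤ 1000); omega),
      scan_mm, if_pos (by show (1001:Int) ≤ r ∧ r ≤ 2000; omega)]

theorem aval3 (r : Int) (h1 : (2001:Int) ≤ r) (h2 : r < 3001) : pvScanA r pvBucketsA = "coca_2001_3000" := by
  unfold pvBucketsA
  rw [scan_mm, if_neg (by show ¬ ((1:Int) ≤ r ∧ r ≤ 1000); omega),
      scan_mm, if_neg (by show ¬ ((1001:Int) ≤ r ∧ r ≤ 2000); omega),
      scan_mm, if_pos (by show (2001:Int) ≤ r ∧ r ≤ 3000; omega)]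

theorem aval4 (r : Int) (h1 : (3001:Int) ≤ r) (h2 : r < 5001) : pvScanA r pvBucketsA = "coca_3001_5000" := by
  unfold pvBucketsA
  rw [scan_mm, if_neg (by show ¬ ((1:Int) ≤ r ∧ r ≤ 1000); omega),
      scan_mm, if_neg (by show ¬ ((1001:Int) ≤ r ∧ r ≤ 2000); omega),
      scan_mm, if_neg (by show ¬ ((2001:Int) ≤ r ∧ r ≤ 3000); omega),
      scan_mm, if_pos (by show (3001:Int) ≤ r ∧ r ≤ 5000; omega)]

theorem aval5 (r : Int) (h1 : (5001:Int) ≤ r) (h2 : r < 8001) : pvScanA r pvBucketsA = "coca_5001_8000" := by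
  unfold pvBucketsA
  rw [scan_mm, if_neg (by show ¬ ((1:Int) ≤ r ∧ r ≤ 1000); omega),
      scan_mm, if_neg (by show ¬ ((1001:Int) ≤ r ∧ r ≤ 2000); omega),
      scan_mm, if_neg (by show ¬ ((2001:Int) ≤ r ∧ r ≤ 3000); omega),
      scan_mm, if_neg (by show ¬ ((3001:Int) ≤ r ∧ r ≤ 5000); omega),
      scan_mm, if_pos (by show (5001:Int) ≤ r ∧ r ≤ 8000; omega)]

theorem aval6 (r : Int) (h1 : (8001:Int) ≤ r) (h2 : r < 12001) : pvScanA r pvBucketsA = "coca_8001_12000" := by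
  unfold pvBucketsA
  rw [scan_mm, if_neg (by show ¬ ((1:Int) ≤ r ∧ r ≤ 1000); omega),
      scan_mm, if_neg (by show ¬ ((1001:Int) ≤ r ∧ r ≤ 2000); omega),
      scan_mm, if_neg (by show ¬ ((2001:Int) ≤ r ∧ r ≤ 3000); omega),
      scan_mm, if_neg (by show ¬ ((3001:Int) ≤ r ∧ r ≤ 5000); omega),
      scan_mm, if_neg (by show ¬ ((5001:Int) ≤ r ∧ r ≤ 8000); omega),
      scan_mm, if_pos (by show (8001:Int) ≤ r ∧ r ≤ 12000; omega)]

theorem aval7 (r : Int) (h1 : (12001:Int) ≤ r) (h2 : r < 15001) : pvScanA r pvBucketsA = "coca_12001_15000" := by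
  unfold pvBucketsA
  rw [scan_mm, if_neg (by show ¬ ((1:Int) ≤ r ∧ r ≤ 1000); omega),
      scan_mm, if_neg (by show ¬ ((1001:Int) ≤ r ∧ r ≤ 2000); omega),
      scan_mm, if_neg (by show ¬ ((2001:Int) ≤ r ∧ r ≤ 3000); omega),
      scan_mm, if_neg (by show ¬ ((3001:Int) ≤ r ∧ r ≤ 5000); omega),
      scan_mm, if_neg (by show ¬ ((5001:Int) ≤ r ∧ r ≤ 8000); omega),
      scan_mm, if_neg (by show ¬ ((8001:Int) ≤ r ∧ r ≤ 12000); omega),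
      scan_mm, if_pos (by show (12001:Int) ≤ r ∧ r ≤ 15000; omega)]

theorem aval8 (r : Int) (h1 : 15001 ≤ r) : pvScanA r pvBucketsA = "coca_15001_plus" := by
  unfold pvBucketsA
  rw [scan_mm, if_neg (by show ¬ ((1:Int) ≤ r ∧ r ≤ 1000); omega),
      scan_mm, if_neg (by show ¬ ((1001:Int) ≤ r ∧ r ≤ 2000); omega),
      scan_mm, if_neg (by show ¬ ((2001:Int) ≤ r ∧ r ≤ 3000); omega),
      scan_mm, if_neg (by show ¬ ((3001:Int) ≤ r ∧ r ≤ 5000); omega),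
      scan_mm, if_neg (by show ¬ ((5001:Int) ≤ r ∧ r ≤ 8000); omega),
      scan_mm, if_neg (by show ¬ ((8001:Int) ≤ r ∧ r ≤ 12000); omega),
      scan_mm, if_neg (by show ¬ ((12001:Int) ≤ r ∧ r ≤ 15000); omega),
      scan_mn, if_pos (by show r ≥ (15001:Int); omega)]

theorem pvAB (r : Int) : pvScanA r pvBucketsA = bucket_key_for_rank_py_alt (some r) := by
  by_cases h0 : r < 1
  · rw [aval0 r (by omega), altv r 0 (bis0 r (by omega))]
    rfl
  by_cases h1 : r < 1001
  · rw [aval1 r (by omega) (by omega), altv r 1 (bis1 r (by omega) (by omega))]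
    rfl
  by_cases h2 : r < 2001
  · rw [aval2 r (by omega) (by omega), altv r 2 (bis2 r (by omega) (by omega))]
    rfl
  by_cases h3 : r < 3001
  · rw [aval3 r (by omega) (by omega), altv r 3 (bis3 r (by omega) (by omega))]
    rfl
  by_cases h4 : r < 5001
  · rw [aval4 r (by omega) (by omega), altv r 4 (bis4 r (by omega) (by omega))]
    rfl
  by_cases h5 : r < 8001
  · rw [aval5 r (by omega) (by omega), altv r 5 (bis5 r (by omega) (by omega))]
    rfl
  by_cases h6 : r < 12001
  · rw [aval6 r (by omega) (by omega), altv r 6 (bis6 r (by omega) (by omega))]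
    rfl
  by_cases h7 : r < 15001
  · rw [aval7 r (by omega) (by omega), altv r 7 (bis7 r (by omega) (by omega))]
    rfl
  rw [aval8 r (by omega), altv r 8 (bis8 r (by omega))]
  rfl

-- ===== VERDICT (by name: the statement is the Claim_ definition above) =====
theorem bucket_key_for_rank_py_spec : Claim_equal_bucket_key_for_rank_py := by
  intro coca_rank _
  unfold Spec_bucket_key_for_rank_py
  rcases coca_rank with _ | r
  · rfl
  · show pvScanA r pvBucketsA = _
    exact pvAB r
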